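-- pv_equiv track=rewrite | github.com/fengsky401/LaneGCN_motionplan | utils/others.py | close_list_index
-- ===== SOURCE A (Python) =====
-- def close_list_index(a,b):
--     distance=[]
--     for i in range(len(a)):
--         dis_x=(a[i][0]-b[0][0])**2
--         dis_y=(a[i][1]-b[0][1])**2
--         dist=dis_x+dis_y
--         distance.append(dist)
--
--
--     return distance.index(min(distance))   #找到距离第20个时刻点最近的index
-- ===== SOURCE B (Python) =====
-- def close_list_index(a, b):
--     bx, by = b[0]
--     best_i = None
--     best_d = None
--     for i, (x, y) in enumerate(a):
--         d = (x - bx) ** 2 + (y - by) ** 2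
--         if best_d is None or d < best_d:
--             best_d = d
--             best_i = i
--     if best_i is None:
--         raise ValueError("close_list_index() arg is an empty sequence")
--     return best_i
-- ===== Notes on version B (the rewrite author's own statement) =====
-- stated objective: alternative
-- what changed: Single-pass running argmin over enumerate(a) replaces building a full distance list, calling min() over it, and then rescanning it with list.index().
import Mathlib
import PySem

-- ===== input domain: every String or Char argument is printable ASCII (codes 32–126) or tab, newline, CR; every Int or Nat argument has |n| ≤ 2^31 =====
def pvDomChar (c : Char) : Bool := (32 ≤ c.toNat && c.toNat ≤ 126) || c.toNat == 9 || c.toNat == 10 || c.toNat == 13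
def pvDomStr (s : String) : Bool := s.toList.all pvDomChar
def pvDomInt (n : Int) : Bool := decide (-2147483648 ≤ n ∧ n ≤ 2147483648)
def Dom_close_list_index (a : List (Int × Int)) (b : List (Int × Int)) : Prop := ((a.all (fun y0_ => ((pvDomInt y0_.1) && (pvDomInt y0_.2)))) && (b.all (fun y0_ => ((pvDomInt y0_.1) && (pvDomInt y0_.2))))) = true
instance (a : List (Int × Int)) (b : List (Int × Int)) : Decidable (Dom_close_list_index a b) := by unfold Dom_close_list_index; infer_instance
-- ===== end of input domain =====

-- B replaces A's build-distance-list / min() / list.index() approach by a single-pass running argmin with strict `<` (same O(n); no intermediate list).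


-- ===== PORT A =====
def close_list_index (a : List (Int × Int)) (b : List (Int × Int)) : Int :=
  let b0 := PySem.List.pyGetD b 0 (0, 0)      -- b[0]; Pre_ excludes b = []
  let distance := (PySem.List.pyRange 0 (a.length : Int) 1).foldl
    (fun acc i =>
      let ai := PySem.List.pyGetD a i (0, 0)  -- a[i]; i in range, so exact
      let dis_x := (ai.1 - b0.1) ^ 2
      let dis_y := (ai.2 - b0.2) ^ 2
      acc ++ [dis_x + dis_y])
    ([] : List Int)
  match PySem.List.min? distance (fun x => x) with  -- min(distance); Pre_ excludes a = []
  | some m => (((PySem.List.index? distance m).getD 0 : Nat) : Int)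
  | none => 0

-- ===== PORT B =====
def close_list_index_alt (a : List (Int × Int)) (b : List (Int × Int)) : Int :=
  let b0 := PySem.List.pyGetD b 0 (0, 0)      -- b[0]; Pre_ excludes b = []
  let st := (PySem.List.enumerate a 0).foldl
    (fun (st : Option Int × Option Int) pr =>
      let d := (pr.2.1 - b0.1) ^ 2 + (pr.2.2 - b0.2) ^ 2
      match st.2 with
      | none => (some pr.1, some d)
      | some m => if d < m then (some pr.1, some d) else st)
    (none, none)
  st.1.getD 0                                  -- Python raises ValueError when still None; Pre_ excludes a = []

-- ===== PRECONDITION & SPEC =====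
-- Pre_ excludes exactly the inputs where the Python raises: empty a (min([]) → ValueError in A,
-- explicit ValueError in B) and empty b (b[0] → IndexError in both).
def Pre_close_list_index (a : List (Int × Int)) (b : List (Int × Int)) : Prop := a ≠ [] ∧ b ≠ []
instance (a : List (Int × Int)) (b : List (Int × Int)) : Decidable (Pre_close_list_index a b) := by unfold Pre_close_list_index; infer_instance
def pvWitness_close_list_index : (List (Int × Int)) × (List (Int × Int)) := ([(1, 2), (3, 4)], [(0, 0)])
def Spec_close_list_index (a : List (Int × Int)) (b : List (Int × Int)) (out : Int) : Prop := out = close_list_index_alt a b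
instance (a : List (Int × Int)) (b : List (Int × Int)) (out : Int) : Decidable (Spec_close_list_index a b out) := by unfold Spec_close_list_index; infer_instance

-- ===== CLAIM (what is proved, stated in full; the proofs are below) =====
def Claim_equal_close_list_index : Prop := ∀ (a : List (Int × Int)) (b : List (Int × Int)), Dom_close_list_index a b → Pre_close_list_index a b → Spec_close_list_index a b (close_list_index a b)

-- ===== LEMMAS AND PROOFS =====

-- running minimum of a nonempty list, as both Pythons compute it
def minv (x : Int) (t : List Int) : Int := t.foldl min x

theorem minv_le (x : Int) (t : List Int) : ∀ y ∈ x :: t, minv x t ≤ y := by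
  have h := PySem.List.min?_isMin (xs := x :: t) (key := fun y => y) (m := t.foldl min x)
    (by rw [PySem.List.min?_id_cons])
  simpa [minv] using h

theorem minv_append (x : Int) (t : List Int) (d : Int) :
    minv x (t ++ [d]) = min (minv x t) d := by
  simp [minv, List.foldl_append]

-- A's distance-building loop produces the map of squared distances
theorem distance_eq_map (a : List (Int × Int)) (b0 : Int × Int) :
    (PySem.List.pyRange 0 (a.length : Int) 1).foldl
      (fun acc i =>
        let ai := PySem.List.pyGetD a i (0, 0)
        acc ++ [(ai.1 - b0.1) ^ 2 + (ai.2 - b0.2) ^ 2])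
      ([] : List Int)
    = a.map (fun p => (p.1 - b0.1) ^ 2 + (p.2 - b0.2) ^ 2) := by
  rw [PySem.List.foldl_pyRange_zero_pyGetD' a (0, 0)
    (fun acc ai => acc ++ [(ai.1 - b0.1) ^ 2 + (ai.2 - b0.2) ^ 2]) []]
  induction a using List.reverseRecOn with
  | nil => rfl
  | append_singleton l d ih => simp [List.foldl_append, ih]

-- B's fold step, abstracted to the list of distance values
def bstep (st : Option Int × Option Int) (pr : Int × Int) : Option Int × Option Int :=
  match st.2 with
  | none => (some pr.1, some pr.2)
  | some m => if pr.2 < m then (some pr.1, some pr.2) else st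

-- B's loop over points equals the abstract fold over distance values
theorem fold_enum_map (a : List (Int × Int)) (b0 : Int × Int) (s : Int)
    (st : Option Int × Option Int) :
    (PySem.List.enumerate a s).foldl
      (fun (st : Option Int × Option Int) pr =>
        let d := (pr.2.1 - b0.1) ^ 2 + (pr.2.2 - b0.2) ^ 2
        match st.2 with
        | none => (some pr.1, some d)
        | some m => if d < m then (some pr.1, some d) else st)
      st
    = (PySem.List.enumerate (a.map (fun p => (p.1 - b0.1) ^ 2 + (p.2 - b0.2) ^ 2)) s).foldl bstep st := by
  induction a generalizing s st with
  | nil => rfl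
  | cons p t ih => simp only [List.map_cons, PySem.List.enumerate_cons, List.foldl_cons, ih, bstep]

-- core invariant: the abstract fold computes (first index of the minimum, the minimum)
theorem fold_argmin (x : Int) (t : List Int) :
    (PySem.List.enumerate (x :: t) 0).foldl bstep (none, none)
    = (some (((PySem.List.index? (x :: t) (minv x t)).getD 0 : Nat) : Int), some (minv x t)) := by
  induction t using List.reverseRecOn with
  | nil =>
      rw [PySem.List.enumerate_cons, PySem.List.enumerate_nil]
      simp [bstep, minv]
  | append_singleton l d ih =>
      have hmem : minv x l ∈ x :: l := by
        have := PySem.List.min?_mem (xs := x :: l) (key := fun y => y) (m := l.foldl min x)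
          (by rw [PySem.List.min?_id_cons])
        simpa [minv] using this
      have henum : PySem.List.enumerate (x :: (l ++ [d])) 0
          = PySem.List.enumerate (x :: l) 0 ++ [(((x :: l).length : Int), d)] := by
        rw [show x :: (l ++ [d]) = (x :: l) ++ [d] by simp, PySem.List.enumerate_append]
        simp [PySem.List.enumerate_cons, PySem.List.enumerate_nil]
      rw [henum, List.foldl_append, ih]
      by_cases hd : d < minv x l
      · have hnotmem : d ∉ x :: l := fun hmem' => absurd (minv_le x l d hmem') (by omega)
        have hmin : min (minv x l) d = d := by omega
        have hidx : PySem.List.index? ((x :: l) ++ [d]) d = some (x :: l).length :=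
          PySem.List.index?_append_singleton_self (x :: l) d hnotmem
        rw [List.cons_append] at hidx
        rw [minv_append, hmin, hidx]
        simp [bstep, hd]
      · have hmin : min (minv x l) d = minv x l := by omega
        rw [minv_append, hmin, ← List.cons_append,
          PySem.List.index?_append_of_mem _ hmem]
        simp [bstep, hd]

-- ===== VERDICT (by name: the statement is the Claim_ definition above) =====
theorem close_list_index_spec : Claim_equal_close_list_index := by
  intro a b _ hpre
  obtain ⟨ha, hb⟩ := hpre
  obtain ⟨p, t, rfl⟩ := List.exists_cons_of_ne_nil ha
  unfold Spec_close_list_index close_list_index close_list_index_alt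
  simp only [distance_eq_map, fold_enum_map, List.map_cons]
  rw [fold_argmin, PySem.List.min?_id_cons]
  simp [minv]
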